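-- pv_equiv track=rewrite | github.com/miladNemati-1/DataStructures | contains_dupes2.py | find_duplicated_extended_problem
-- ===== SOURCE A (Python) =====
-- def find_duplicated_extended_problem(numbers,k):
--     number_indices_dict = {}
--     for index,number in enumerate(numbers):
--         if number_indices_dict.__contains__(number) and abs(number_indices_dict[number] - index) <= k:
--             return True
--         else:
--             number_indices_dict[number] = index
--     return False
-- ===== SOURCE B (Python) =====
-- def find_duplicated_extended_problem(numbers, k):
--     for i, x in enumerate(numbers):
--         if x in numbers[max(i - k, 0):i]:
--             return True
--     return False
-- ===== Notes on version B (the rewrite author's own statement) =====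
-- stated objective: simpler
-- what changed: Replaces the last-index dictionary with a stateless scan that tests each element for membership in the slice of the previous min(i,k) elements.
import Mathlib
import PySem

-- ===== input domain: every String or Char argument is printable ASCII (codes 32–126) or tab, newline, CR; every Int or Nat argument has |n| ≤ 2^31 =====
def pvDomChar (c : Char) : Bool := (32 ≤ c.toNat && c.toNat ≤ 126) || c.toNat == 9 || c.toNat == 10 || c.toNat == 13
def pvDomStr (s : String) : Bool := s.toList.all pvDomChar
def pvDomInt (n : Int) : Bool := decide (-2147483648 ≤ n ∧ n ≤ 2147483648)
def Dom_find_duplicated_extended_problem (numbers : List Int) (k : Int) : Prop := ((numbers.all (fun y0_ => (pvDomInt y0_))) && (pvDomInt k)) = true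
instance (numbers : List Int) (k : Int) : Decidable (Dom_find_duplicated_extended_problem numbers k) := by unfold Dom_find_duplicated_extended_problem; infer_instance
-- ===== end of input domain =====

-- B replaces A's last-index dictionary with a stateless scan testing membership in the slice of the previous k elements (simpler, not faster).


-- ===== PORT A =====
-- A's loop: dict mapping each value to its last index; early return when the
-- last occurrence of the current value is within distance k.
def pvALoop (k : Int) : List Int → Nat → PySem.Dict Int Int → Bool
  | [], _, _ => false
  | x :: xs, i, d =>
    -- `number_indices_dict.__contains__(number) and abs(number_indices_dict[number] - index) <= k`
    match d.get? x with
    | some j => if |j - (i : Int)| ≤ k then true else pvALoop k xs (i + 1) (d.insert x (i : Int))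
    | none => pvALoop k xs (i + 1) (d.insert x (i : Int))

def find_duplicated_extended_problem (numbers : List Int) (k : Int) : Bool :=
  pvALoop k numbers 0 PySem.Dict.empty

-- ===== PORT B =====
-- B's loop: `x in numbers[max(i-k,0):i]`
def pvBLoop (numbers : List Int) (k : Int) : List Int → Nat → Bool
  | [], _ => false
  | x :: xs, i =>
    if (PySem.List.slice numbers (some (max ((i : Int) - k) 0)) (some (i : Int))).contains x
    then true
    else pvBLoop numbers k xs (i + 1)

def find_duplicated_extended_problem_alt (numbers : List Int) (k : Int) : Bool :=
  pvBLoop numbers k numbers 0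

-- ===== PRECONDITION & SPEC =====
def Spec_find_duplicated_extended_problem (numbers : List Int) (k : Int) (out : Bool) : Prop := out = find_duplicated_extended_problem_alt numbers k
instance (numbers : List Int) (k : Int) (out : Bool) : Decidable (Spec_find_duplicated_extended_problem numbers k out) := by unfold Spec_find_duplicated_extended_problem; infer_instance

-- ===== CLAIM (what is proved, stated in full; the proofs are below) =====
def Claim_equal_find_duplicated_extended_problem : Prop := ∀ (numbers : List Int) (k : Int), Dom_find_duplicated_extended_problem numbers k → Spec_find_duplicated_extended_problem numbers k (find_duplicated_extended_problem numbers k)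

-- ===== LEMMAS AND PROOFS =====

-- index of the LAST occurrence of y in p (none if absent)
def pvLastIdx : List Int → Int → Option Nat
  | [], _ => none
  | a :: l, y =>
    match pvLastIdx l y with
    | some j => some (j + 1)
    | none => if a = y then some 0 else none

theorem pvLastIdx_cons_of_some (a y : Int) (l : List Int) (j : Nat)
    (hl : pvLastIdx l y = some j) : pvLastIdx (a :: l) y = some (j + 1) := by
  simp [pvLastIdx, hl]

theorem pvLastIdx_cons_of_none (a y : Int) (l : List Int)
    (hl : pvLastIdx l y = none) : pvLastIdx (a :: l) y = if a = y then some 0 else none := by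
  simp [pvLastIdx, hl]

theorem pvALoop_cons_some (k : Int) (x : Int) (xs : List Int) (i : Nat)
    (d : PySem.Dict Int Int) (j : Int) (hg : d.get? x = some j) :
    pvALoop k (x :: xs) i d =
      if |j - (i : Int)| ≤ k then true else pvALoop k xs (i + 1) (d.insert x (i : Int)) := by
  simp [pvALoop, hg]

theorem pvALoop_cons_none (k : Int) (x : Int) (xs : List Int) (i : Nat)
    (d : PySem.Dict Int Int) (hg : d.get? x = none) :
    pvALoop k (x :: xs) i d = pvALoop k xs (i + 1) (d.insert x (i : Int)) := by
  simp [pvALoop, hg]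

theorem pvLastIdx_lt_length (p : List Int) (y : Int) (j : Nat) (h : pvLastIdx p y = some j) :
    j < p.length := by
  induction p generalizing j with
  | nil => simp [pvLastIdx] at h
  | cons a l ih =>
    cases hl : pvLastIdx l y with
    | some j' =>
      rw [pvLastIdx_cons_of_some a y l j' hl] at h
      simp only [Option.some.injEq] at h
      have := ih j' hl
      simp only [List.length_cons]
      omega
    | none =>
      rw [pvLastIdx_cons_of_none a y l hl] at h
      split_ifs at h with hay
      · simp only [Option.some.injEq] at h
        simp only [List.length_cons]
        omega

theorem pvLastIdx_append_single (p : List Int) (x y : Int) :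
    pvLastIdx (p ++ [x]) y = if x = y then some p.length else pvLastIdx p y := by
  induction p with
  | nil => simp [pvLastIdx]
  | cons a l ih =>
    by_cases hxy : x = y
    · rw [if_pos hxy] at ih ⊢
      rw [List.cons_append, pvLastIdx_cons_of_some a y (l ++ [x]) l.length ih]
      simp
    · rw [if_neg hxy] at ih ⊢
      rw [List.cons_append]
      cases hl : pvLastIdx l y with
      | some j' =>
        rw [pvLastIdx_cons_of_some a y (l ++ [x]) j' (ih.trans hl),
          pvLastIdx_cons_of_some a y l j' hl]
      | none =>
        rw [pvLastIdx_cons_of_none a y (l ++ [x]) (ih.trans hl),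
          pvLastIdx_cons_of_none a y l hl]

theorem pvMem_drop_iff (p : List Int) (y : Int) :
    ∀ m : Nat, y ∈ p.drop m ↔ ∃ j, pvLastIdx p y = some j ∧ m ≤ j := by
  induction p with
  | nil => intro m; simp [pvLastIdx]
  | cons a l ih =>
    intro m
    cases hl : pvLastIdx l y with
    | some j' =>
      have hmem : y ∈ l := by
        have := (ih 0).mpr ⟨j', hl, Nat.zero_le _⟩
        simpa using this
      rw [pvLastIdx_cons_of_some a y l j' hl]
      cases m with
      | zero =>
        simp only [List.drop_zero]
        constructor
        · intro _; exact ⟨j' + 1, rfl, Nat.zero_le _⟩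
        · intro _; exact List.mem_cons_of_mem _ hmem
      | succ m' =>
        rw [List.drop_succ_cons, ih m', hl]
        constructor
        · rintro ⟨j, hj, hm⟩
          simp only [Option.some.injEq] at hj; subst hj
          exact ⟨j' + 1, rfl, by omega⟩
        · rintro ⟨j, hj, hm⟩
          simp only [Option.some.injEq] at hj; subst hj
          exact ⟨j', rfl, by omega⟩
    | none =>
      have hnmem : y ∉ l := by
        intro h
        rcases (ih 0).mp (by simpa using h) with ⟨j, hj, _⟩
        rw [hl] at hj; exact absurd hj (by simp)
      rw [pvLastIdx_cons_of_none a y l hl]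
      cases m with
      | zero =>
        simp only [List.drop_zero]
        constructor
        · intro hmem
          rcases List.mem_cons.mp hmem with h | h
          · exact ⟨0, by simp [h.symm], le_refl _⟩
          · exact absurd h hnmem
        · rintro ⟨j, hj, -⟩
          split_ifs at hj with hay
          · exact hay ▸ List.mem_cons_self
      | succ m' =>
        rw [List.drop_succ_cons]
        constructor
        · intro h
          exact absurd (List.mem_of_mem_drop h) hnmem
        · rintro ⟨j, hj, hm⟩
          split_ifs at hj with hay
          · simp only [Option.some.injEq] at hj; omega

-- A's dict condition at index i = p.length agrees with membership in the last-k window of p.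
theorem pvCond_iff (k : Int) (p : List Int) (x : Int) :
    (∃ n : Nat, pvLastIdx p x = some n ∧ |(n : Int) - (p.length : Int)| ≤ k) ↔
      x ∈ p.drop ((p.length : Int) - k).toNat := by
  rw [pvMem_drop_iff]
  constructor
  · rintro ⟨n, hn, habs⟩
    have hlt := pvLastIdx_lt_length p x n hn
    refine ⟨n, hn, ?_⟩
    have h1 : |(n : Int) - (p.length : Int)| = (p.length : Int) - n := by
      rw [abs_sub_comm]
      exact abs_of_nonneg (by omega)
    rw [h1] at habs
    omega
  · rintro ⟨n, hn, hm⟩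
    have hlt := pvLastIdx_lt_length p x n hn
    refine ⟨n, hn, ?_⟩
    have h2 : ((p.length : Int) - k) ≤ (n : Int) := by
      have := Int.toNat_le.mp hm
      omega
    have h1 : |(n : Int) - (p.length : Int)| = (p.length : Int) - n := by
      rw [abs_sub_comm]
      exact abs_of_nonneg (by omega)
    omega

theorem pvLoop_eq (k : Int) (numbers : List Int) :
    ∀ (rest : List Int) (i : Nat) (d : PySem.Dict Int Int),
      i + rest.length = numbers.length →
      numbers.drop i = rest →
      (∀ y, d.get? y = (pvLastIdx (numbers.take i) y).map (fun n : Nat => (n : Int))) →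
      pvALoop k rest i d = pvBLoop numbers k rest i := by
  intro rest
  induction rest with
  | nil => intro i d _ _ _; simp [pvALoop, pvBLoop]
  | cons x xs ih =>
    intro i d hlen hdrop hdict
    have hil : i < numbers.length := by simp at hlen; omega
    have hplen : (numbers.take i).length = i := by
      simp only [List.length_take]
      omega
    have htake1 : numbers.take (i + 1) = numbers.take i ++ [x] := by
      rw [List.take_add, hdrop]; rfl
    -- B's slice is the last-k window of the prefix
    have hslice : PySem.List.slice numbers (some (max ((i : Int) - k) 0)) (some (i : Int)) =
        (numbers.take i).drop ((i : Int) - k).toNat := by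
      rw [PySem.List.slice_toNat numbers (le_max_right _ _) (Int.natCast_nonneg i)]
      have hmax : (max ((i : Int) - k) 0).toNat = ((i : Int) - k).toNat := by omega
      rw [hmax, Int.toNat_natCast, List.drop_take]
    -- the two step conditions agree
    have hcond : (∃ n : Nat, pvLastIdx (numbers.take i) x = some n ∧ |(n : Int) - (i : Int)| ≤ k) ↔
        ((PySem.List.slice numbers (some (max ((i : Int) - k) 0)) (some (i : Int))).contains x = true) := by
      rw [hslice, List.contains_iff_mem]
      have := pvCond_iff k (numbers.take i) x
      rw [hplen] at this
      exact this
    have hins : ∀ y, ((d.insert x (i : Int)).get? y =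
        (pvLastIdx (numbers.take (i + 1)) y).map (fun n : Nat => (n : Int))) := by
      intro y
      rw [htake1, pvLastIdx_append_single, PySem.Dict.get?_insert]
      by_cases hxy : y = x
      · rw [if_pos hxy, if_pos hxy.symm, hplen]
        simp
      · rw [if_neg hxy, if_neg (fun h => hxy h.symm)]
        exact hdict y
    have hstep : pvALoop k xs (i + 1) (d.insert x (i : Int)) = pvBLoop numbers k xs (i + 1) :=
      ih (i + 1) (d.insert x (i : Int)) (by simp at hlen ⊢; omega)
        (by rw [← List.drop_drop, hdrop]; rfl) hins
    have hB : pvBLoop numbers k (x :: xs) i =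
        if (PySem.List.slice numbers (some (max ((i : Int) - k) 0)) (some (i : Int))).contains x
        then true else pvBLoop numbers k xs (i + 1) := rfl
    cases hl : pvLastIdx (numbers.take i) x with
    | some n =>
      have hg : d.get? x = some ((n : Int)) := by rw [hdict x, hl]; rfl
      rw [pvALoop_cons_some k x xs i d (n : Int) hg, hB]
      by_cases habs : |(n : Int) - (i : Int)| ≤ k
      · rw [if_pos habs, if_pos (hcond.mp ⟨n, hl, habs⟩)]
      · have hc : ¬ ((PySem.List.slice numbers (some (max ((i : Int) - k) 0)) (some (i : Int))).contains x = true) := by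
          intro hc
          rcases hcond.mpr hc with ⟨n', hn', habs'⟩
          rw [hl] at hn'
          simp only [Option.some.injEq] at hn'
          subst hn'
          exact habs habs'
        rw [if_neg habs, if_neg hc]
        exact hstep
    | none =>
      have hg : d.get? x = none := by rw [hdict x, hl]; rfl
      rw [pvALoop_cons_none k x xs i d hg, hB]
      have hc : ¬ ((PySem.List.slice numbers (some (max ((i : Int) - k) 0)) (some (i : Int))).contains x = true) := by
        intro hc
        rcases hcond.mpr hc with ⟨n', hn', _⟩
        rw [hl] at hn'
        exact absurd hn' (by simp)
      rw [if_neg hc]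
      exact hstep

-- ===== VERDICT (by name: the statement is the Claim_ definition above) =====
theorem find_duplicated_extended_problem_spec : Claim_equal_find_duplicated_extended_problem := by
  intro numbers k _
  unfold Spec_find_duplicated_extended_problem find_duplicated_extended_problem find_duplicated_extended_problem_alt
  exact pvLoop_eq k numbers numbers 0 PySem.Dict.empty (by simp) (by simp)
    (by intro y; simp [pvLastIdx, PySem.Dict.get?_empty])
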